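-- pv_equiv track=rewrite | github.com/SirClashin1/BCChallenges | 17_05_23.py | simple_pair
-- ===== SOURCE A (Python) =====
-- def simple_pair(numbers: list[int], number: int) -> list[int] | None:
--     if not numbers:
--         return None
--
--     first_num = numbers[0]
--     remaining_nums = numbers[1:]
--
--     for num in remaining_nums:
--         if first_num * num == number:
--             return [first_num, num]
--
--     return simple_pair(remaining_nums, number)
-- ===== SOURCE B (Python) =====
-- def simple_pair(numbers: list[int], number: int) -> list[int] | None:
--     # one right-to-left pass keeping the set of values seen so far (the suffix)
--     # and the element immediately to the right; overwriting 'best' on each match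
--     # leaves the leftmost ordered pair, matching A's scan order.
--     best = None
--     seen = set()
--     nxt_exists = False
--     nxt = 0
--     for x in reversed(numbers):
--         if nxt_exists:
--             if x == 0:
--                 if number == 0:
--                     best = [0, nxt]
--             elif number % x == 0 and number // x in seen:
--                 best = [x, number // x]
--         seen.add(x)
--         nxt = x
--         nxt_exists = True
--     return best
-- ===== Notes on version B (the rewrite author's own statement) =====
-- stated objective: faster
-- what changed: Replaced A's quadratic scan-for-each-head recursion by a single right-to-left pass that keeps a set of the values seen so far and tests number % x == 0 and number // x in set (zero head handled directly), overwriting the result so the leftmost pair wins.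
import Mathlib
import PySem

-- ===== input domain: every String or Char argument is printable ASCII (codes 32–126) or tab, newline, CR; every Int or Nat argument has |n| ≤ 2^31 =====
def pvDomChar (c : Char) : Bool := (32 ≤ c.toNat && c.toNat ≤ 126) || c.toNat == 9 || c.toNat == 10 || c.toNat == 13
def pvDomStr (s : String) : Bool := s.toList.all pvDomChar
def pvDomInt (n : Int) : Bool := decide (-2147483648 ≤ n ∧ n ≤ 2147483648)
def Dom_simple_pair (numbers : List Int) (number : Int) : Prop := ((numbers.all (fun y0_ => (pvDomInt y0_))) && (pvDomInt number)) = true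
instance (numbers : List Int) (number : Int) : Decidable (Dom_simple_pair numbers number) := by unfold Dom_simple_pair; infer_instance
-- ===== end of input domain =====

-- B replaces A's quadratic scan-per-head recursion by one right-to-left pass with a seen-set
-- and division (objective: faster, O(n^2) -> O(n)).

-- ===== PORT A =====
-- the inner 'for num in remaining_nums: if first_num * num == number: return [first_num, num]'
def spLoop (first_num : Int) (rest : List Int) (number : Int) : Option (List Int) :=
  match rest with
  | [] => none
  | num :: tl =>
    if first_num * num = number then some [first_num, num] else spLoop first_num tl number

def simple_pair (numbers : List Int) (number : Int) : Option (List Int) :=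
  match numbers with
  | [] => none
  | first_num :: remaining_nums =>
    match spLoop first_num remaining_nums number with
    | some r => some r
    | none => simple_pair remaining_nums number

-- ===== PORT B =====
-- state = (best, seen, nxt_exists, nxt); loop body of Source B's 'for x in reversed(numbers)'
def spStep (number : Int) (st : Option (List Int) × PySem.Set Int × Bool × Int) (x : Int) :
    Option (List Int) × PySem.Set Int × Bool × Int :=
  let best := st.1
  let seen := st.2.1
  let best' :=
    if st.2.2.1 then
      if x = 0 then (if number = 0 then some [0, st.2.2.2] else best)
      else if PySem.Int.mod number x = 0 ∧
              PySem.Set.contains seen (PySem.Int.floordiv number x) = true then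
        some [x, PySem.Int.floordiv number x]
      else best
    else best
  (best', PySem.Set.add seen x, true, x)

def simple_pair_alt (numbers : List Int) (number : Int) : Option (List Int) :=
  (numbers.reverse.foldl (spStep number) (none, PySem.Set.empty, false, 0)).1

-- ===== PRECONDITION & SPEC =====
def Spec_simple_pair (numbers : List Int) (number : Int) (out : Option (List Int)) : Prop := out = simple_pair_alt numbers number
instance (numbers : List Int) (number : Int) (out : Option (List Int)) : Decidable (Spec_simple_pair numbers number out) := by unfold Spec_simple_pair; infer_instance

-- ===== CLAIM (what is proved, stated in full; the proofs are below) =====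
def Claim_equal_simple_pair : Prop := ∀ (numbers : List Int) (number : Int), Dom_simple_pair numbers number → Spec_simple_pair numbers number (simple_pair numbers number)

-- ===== LEMMAS AND PROOFS =====

-- for nonzero x, 'x * y = n' pins y to the exact quotient
theorem mul_eq_iff_div (x y n : Int) (hx : x ≠ 0) :
    x * y = n ↔ (PySem.Int.mod n x = 0 ∧ PySem.Int.floordiv n x = y) := by
  have hdm := PySem.Int.floordiv_mul_add_mod n x
  constructor
  · intro h
    have hdvd : x ∣ n := ⟨y, h.symm⟩
    have hm : PySem.Int.mod n x = 0 := (PySem.Int.mod_eq_zero_iff_dvd n x).mpr hdvd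
    refine ⟨hm, ?_⟩
    rw [hm] at hdm
    have : PySem.Int.floordiv n x * x = x * y := by omega
    have := mul_right_cancel₀ hx (by linarith [this] : PySem.Int.floordiv n x * x = y * x)
    exact this
  · rintro ⟨hm, hq⟩
    rw [hm] at hdm
    rw [← hq]; linarith [hdm]

-- characterisation of A's inner scan
theorem spLoop_char (x : Int) (xs : List Int) (n : Int) :
    spLoop x xs n =
      if x = 0 then
        (if n = 0 then (match xs with | [] => none | y :: _ => some [0, y]) else none)
      else if PySem.Int.mod n x = 0 ∧ (PySem.Int.floordiv n x) ∈ xs then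
        some [x, PySem.Int.floordiv n x]
      else none := by
  induction xs with
  | nil =>
    simp only [spLoop]
    split_ifs <;> first | rfl | simp_all
  | cons y ys ih =>
    by_cases hx : x = 0
    · subst hx
      by_cases hn : (0:Int) * y = n
      · simp [spLoop, hn]; omega
      · have hn' : n ≠ 0 := by intro h; apply hn; simp [h]
        have h0 : ¬ ((0:Int) = n) := fun h => hn' h.symm
        simp [spLoop, hn', h0, ih]
    · by_cases hm : x * y = n
      · have := (mul_eq_iff_div x y n hx).mp hm
        simp [spLoop, hm, hx, this.1, this.2]
      · have hnot : ¬ (PySem.Int.mod n x = 0 ∧ PySem.Int.floordiv n x = y) := by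
          intro h; exact hm ((mul_eq_iff_div x y n hx).mpr h)
        simp only [spLoop, if_neg hm, ih, if_neg hx]
        by_cases hmod : PySem.Int.mod n x = 0
        · have hne : PySem.Int.floordiv n x ≠ y := fun h => hnot ⟨hmod, h⟩
          simp [hmod, hne]
        · simp [hmod]


-- B's fold, written as a foldr over the original list
def spFoldr (number : Int) (l : List Int) : Option (List Int) × PySem.Set Int × Bool × Int :=
  l.foldr (fun x st => spStep number st x) (none, PySem.Set.empty, false, 0)

theorem spFoldr_invariant (number : Int) (l : List Int) :
    (spFoldr number l).1 = simple_pair l number ∧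
    (∀ c, PySem.Set.contains (spFoldr number l).2.1 c = true ↔ c ∈ l) ∧
    ((spFoldr number l).2.2 = match l with | [] => (false, (0:Int)) | y :: _ => (true, y)) := by
  induction l with
  | nil =>
    refine ⟨rfl, ?_, rfl⟩
    intro c; simp [spFoldr, PySem.Set.empty]
  | cons x xs ih =>
    obtain ⟨ih1, ih2, ih3⟩ := ih
    have hstep : spFoldr number (x :: xs) = spStep number (spFoldr number xs) x := rfl
    refine ⟨?_, ?_, ?_⟩
    · rw [hstep]
      show (spStep number (spFoldr number xs) x).1 = _
      simp only [spStep]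
      rw [ih3]
      cases xs with
      | nil =>
        simp [simple_pair, spLoop, ih1]
      | cons y ys =>
        simp only
        have hmem : ∀ c, (PySem.Set.contains (spFoldr number (y :: ys)).2.1 c = true) ↔ c ∈ y :: ys := ih2
        rw [show simple_pair (x :: y :: ys) number =
              (match spLoop x (y :: ys) number with
               | some r => some r
               | none => simple_pair (y :: ys) number) from rfl]
        rw [spLoop_char]
        by_cases hx : x = 0
        · by_cases hn : number = 0 <;> simp [hx, hn, ih1]
        · simp only [if_neg hx]
          by_cases hc : PySem.Int.mod number x = 0 ∧ (PySem.Int.floordiv number x) ∈ (y :: ys)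
          · have hmS : PySem.Int.floordiv number x ∈ (spFoldr number (y :: ys)).2.1 := by
              have h := (hmem (PySem.Int.floordiv number x)).mpr hc.2
              rwa [PySem.Set.contains_iff] at h
            simp [hc.1, hc.2, hmS]
          · by_cases hmod : PySem.Int.mod number x = 0
            · have hnL : ¬ (PySem.Int.floordiv number x = y ∨ PySem.Int.floordiv number x ∈ ys) :=
                fun h => hc ⟨hmod, List.mem_cons.mpr h⟩
              have hnS : PySem.Int.floordiv number x ∉ (spFoldr number (y :: ys)).2.1 := by
                intro h
                exact hc ⟨hmod, (hmem _).mp (by rwa [PySem.Set.contains_iff])⟩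
              simp [hmod, hnS, hnL, ih1]
            · simp [hmod, ih1]
    · intro c
      rw [hstep]
      show PySem.Set.contains (PySem.Set.add (spFoldr number xs).2.1 x) c = true ↔ _
      rw [PySem.Set.contains_iff, PySem.Set.mem_add]
      rw [← PySem.Set.contains_iff, ih2]
      simp [List.mem_cons]
      tauto
    · rw [hstep]; rfl

theorem alt_eq (numbers : List Int) (number : Int) :
    simple_pair_alt numbers number = simple_pair numbers number := by
  unfold simple_pair_alt
  rw [List.foldl_reverse]
  exact (spFoldr_invariant number numbers).1

-- ===== VERDICT (by name: the statement is the Claim_ definition above) =====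
theorem simple_pair_spec : Claim_equal_simple_pair := by
  intro numbers number _
  unfold Spec_simple_pair
  exact (alt_eq numbers number).symm
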